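/- GENERATED by farm/mkstatement.py from design/units.tsv (unit `DGifGetExtensionNext.2`) and the assertions of Gif/Spec/Seg_DGifGetExtensionNext.lean — do not edit.
   THE STATEMENT of the proof unit `DGifGetExtensionNext.2`: segment 2 of `DGifGetExtensionNext` (31 instructions; entries 0x1098c3;
   exits 0x1098a6; ranges 0x1098c3-0x109947)
   takes each of its entry assertions to one of its exit assertions (`Gif.Spec.DGifGetExtensionNext.Seg2`), given the contracts of its callees.
   What the names mean: ProgX/Base/Spec/Basic.lean (the shared hypotheses), Gif/Spec/Seg_DGifGetExtensionNext.lean (the assertions). The theorem to prove: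
   `theorem DGifGetExtensionNext_2_ok : Gif.Spec.DGifGetExtensionNext_2.Statement`. -/
import Gif.Code
import Gif.Dec.All
import Gif.Labels
import Gif.Spec.Reader
import Gif.Spec.Seg_DGifGetExtensionNext
namespace Gif.Spec.DGifGetExtensionNext_2
open X86 X86.User Asan

/-- The statement of unit `DGifGetExtensionNext.2`. -/
def Statement : Prop :=
  ∀ (Lay : Layout) (_hLay : Lay.hi = 0x1000000) (μ : Microarch) (_hμ : UserX.MicroOK μ) (u₀ : State)
    (_hcode : HasCodeNat Lay u₀ Gif.L.DGifGetExtensionNext.entry Gif.Code.code_DGifGetExtensionNext.nat Gif.L.DGifGetExtensionNext.size)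
    (_h_InternalRead : ∀ (H : Heap) (rest : List Obj) (frames : List (Nat × FrameLayout)) (F : Forest) (R : Rd) (n : Nat), Calls Lay μ ProgX.Base.WayInv (ProgX.Base.conv u₀) Gif.L.InternalRead.entry (Gif.Spec.InternalRead.spec H rest frames F R n))
    (_h_asan_store8_noabort : Asan.SmallCheck Lay μ ProgX.Base.WayInv (ProgX.Base.CodeOK u₀) [.rax, .rcx, .rdx] 8 ProgX.Base.L.__asan_store8_noabort.entry)
    (_h_asan_store1_noabort : Asan.SmallCheck Lay μ ProgX.Base.WayInv (ProgX.Base.CodeOK u₀) [.rax, .rdx] 1 ProgX.Base.L.__asan_store1_noabort.entry)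
    (_h_asan_store4_noabort : Asan.SmallCheck Lay μ ProgX.Base.WayInv (ProgX.Base.CodeOK u₀) [.rax, .rcx, .rdx] 4 ProgX.Base.L.__asan_store4_noabort.entry),
    Gif.Spec.DGifGetExtensionNext.Seg2 Lay μ u₀

end Gif.Spec.DGifGetExtensionNext_2
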